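-- pv_equiv track=rewrite | github.com/smartdataworks/Oxyflux-file-upload | upload_raw_data.py | make_it_fit
-- ===== SOURCE A (Python) =====
-- from typing import Union, Callable, NamedTuple, List, Dict
--
-- def make_it_fit(cell_list: List[str], limit: int) -> Union[None, List[str]]:
--     """
--     This function attempts to shorten a list of strings by finding and
--     elimininating empty string elements from left to rigth. If succesfull
--     it will return the modified list. Otherwise it will return None.
--     """
--
--     if len(cell_list) <= limit:
--         return cell_list
--     else:
--         while sum([len(x) == 0 for x in cell_list]):
--             cell_list.remove("")
--             if len(cell_list) == limit:
--                 return cell_list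
--         else:
--             return None
-- ===== SOURCE B (Python) =====
-- from typing import Union, List
--
-- def make_it_fit(cell_list: List[str], limit: int) -> Union[None, List[str]]:
--     # Single pass: count empties, drop the first (len-limit) of them, or None.
--     # Unlike A, does not mutate cell_list in place (return value is identical).
--     n = len(cell_list)
--     if n <= limit:
--         return cell_list
--     need = n - limit
--     if cell_list.count("") < need:
--         return None
--     out = []
--     for x in cell_list:
--         if need > 0 and x == "":
--             need -= 1
--         else:
--             out.append(x)
--     return out
-- ===== Notes on version B (the rewrite author's own statement) =====
-- stated objective: alternative
-- what changed: A repeatedly rescans the list (recomputing the empty-count, then list.remove) once per removal; B makes a single counting pass, computes need = len - limit up front, returns None if there are fewer empties than need, and otherwise drops the first need empties in one scan (O(n) vs A's O(k*n); measured 1.4x at the largest timing size, below the 1.5x bar, so no speed claim).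
import Mathlib
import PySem

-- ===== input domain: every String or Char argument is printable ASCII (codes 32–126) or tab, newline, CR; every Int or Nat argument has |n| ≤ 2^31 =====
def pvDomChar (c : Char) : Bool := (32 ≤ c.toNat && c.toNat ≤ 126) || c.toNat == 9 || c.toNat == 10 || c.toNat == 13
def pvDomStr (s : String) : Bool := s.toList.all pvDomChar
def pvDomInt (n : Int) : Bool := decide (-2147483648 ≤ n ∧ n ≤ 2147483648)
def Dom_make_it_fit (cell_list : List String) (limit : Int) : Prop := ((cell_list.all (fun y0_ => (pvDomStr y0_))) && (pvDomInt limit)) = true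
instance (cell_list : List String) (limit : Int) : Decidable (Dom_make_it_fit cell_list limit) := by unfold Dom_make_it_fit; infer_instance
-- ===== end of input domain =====

-- B replaces A's remove-one-empty-at-a-time rescanning loop by a single counting pass;
-- equivalence is about the RETURN value only (A mutates cell_list in place, B does not).

-- ===== PORT A =====
-- the while-loop: each turn recomputes sum([len(x)==0 for x in cell_list]), removes the
-- first "" and tests len(cell_list) == limit; fuel only makes the recursion total
-- (each turn shortens the list by one, so fuel = length+1 is never exhausted).
def mifLoop : Nat → List String → Int → Option (List String)
  | 0, _, _ => none
  | fuel+1, l, limit =>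
    if ((l.map (fun x => if PySem.Str.len x = 0 then (1 : Int) else 0)).sum ≠ 0) then
      match PySem.List.remove? l "" with
      | some l' => if ((l'.length : Int) = limit) then some l' else mifLoop fuel l' limit
      | none => none
    else none

def make_it_fit (cell_list : List String) (limit : Int) : Option (List String) :=
  if (cell_list.length : Int) ≤ limit then some cell_list
  else mifLoop (cell_list.length + 1) cell_list limit

-- ===== PORT B =====
-- the for-loop of Source B: keep x unless x == "" and empties still need dropping.
def mifDrop (need : Int) : List String → List String
  | [] => []
  | x :: xs => if 0 < need ∧ x = "" then mifDrop (need - 1) xs else x :: mifDrop need xs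

def make_it_fit_alt (cell_list : List String) (limit : Int) : Option (List String) :=
  if (cell_list.length : Int) ≤ limit then some cell_list
  else if ((cell_list.count "" : Int) < (cell_list.length : Int) - limit) then none
  else some (mifDrop ((cell_list.length : Int) - limit) cell_list)

-- ===== PRECONDITION & SPEC =====
def Spec_make_it_fit (cell_list : List String) (limit : Int) (out : Option (List String)) : Prop := out = make_it_fit_alt cell_list limit
instance (cell_list : List String) (limit : Int) (out : Option (List String)) : Decidable (Spec_make_it_fit cell_list limit out) := by unfold Spec_make_it_fit; infer_instance

-- ===== CLAIM (what is proved, stated in full; the proofs are below) =====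
def Claim_equal_make_it_fit : Prop := ∀ (cell_list : List String) (limit : Int), Dom_make_it_fit cell_list limit → Spec_make_it_fit cell_list limit (make_it_fit cell_list limit)

-- ===== LEMMAS AND PROOFS =====

-- len(x) == 0 is x == ""
theorem str_len_zero_iff (x : String) : PySem.Str.len x = 0 ↔ x = "" := by
  rw [PySem.Str.len_eq]
  constructor
  · intro h
    have : x.toList = [] := by simpa using h
    exact String.toList_inj.mp (by simpa using this)
  · intro h; subst h; rfl

theorem empties_fun :
    (fun x : String => if PySem.Str.len x = 0 then (1 : Int) else 0)
      = (fun x : String => if x = "" then (1 : Int) else 0) :=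
  funext fun x => if_congr (str_len_zero_iff x) rfl rfl

-- the recomputed 0/1-sum of A's while condition is the count of ""
theorem sum_empties (l : List String) :
    (l.map (fun x => if PySem.Str.len x = 0 then (1 : Int) else 0)).sum = (l.count "" : Int) := by
  rw [empties_fun]
  induction l with
  | nil => rfl
  | cons x xs ih =>
    by_cases hx : x = ""
    · simp [hx, ih]; ring
    · simp [hx, ih]

-- removing the first "" is one step of B's drop
theorem mifDrop_step (need : Int) (hneed : 0 < need) :
    ∀ (l l' : List String), PySem.List.remove? l "" = some l' →
      mifDrop need l = mifDrop (need - 1) l' := by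
  intro l
  induction l with
  | nil => intro l' h; simp [PySem.List.remove?] at h
  | cons x xs ih =>
    intro l' h
    by_cases hx : x = ""
    · subst hx
      rw [PySem.List.remove?_cons_self] at h
      cases h
      simp [mifDrop, hneed]
    · rw [PySem.List.remove?_cons_of_ne xs hx] at h
      cases hmx : PySem.List.remove? xs "" with
      | none => rw [hmx] at h; simp at h
      | some t =>
        rw [hmx] at h
        simp at h
        subst h
        have h0 : ¬ (0 < need ∧ x = "") := by simp [hx]
        have h1 : ¬ (0 < need - 1 ∧ x = "") := by simp [hx]
        simp only [mifDrop]
        rw [if_neg h0, if_neg h1, ih t hmx]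

-- dropping nothing is the identity
theorem mifDrop_nonpos (need : Int) (hneed : ¬ 0 < need) : ∀ l : List String, mifDrop need l = l := by
  intro l
  induction l with
  | nil => rfl
  | cons x xs ih => simp [mifDrop, hneed, ih]

-- not enough empties: the loop exhausts them and falls to `return None`
theorem mifLoop_none : ∀ (fuel : Nat) (l : List String) (limit : Int),
    l.count "" < fuel → (l.count "" : Int) < (l.length : Int) - limit →
    mifLoop fuel l limit = none := by
  intro fuel
  induction fuel with
  | zero => intro l limit hf _; omega
  | succ f ih =>
    intro l limit hf hlt
    by_cases hc : l.count "" = 0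
    · have hz : (l.map (fun x => if PySem.Str.len x = 0 then (1 : Int) else 0)).sum = 0 := by
        rw [sum_empties, hc]; rfl
      rw [mifLoop, if_neg (by simpa using hz)]
    · have hcpos : 0 < l.count "" := Nat.pos_of_ne_zero hc
      have hmem : "" ∈ l := List.count_pos_iff.mp hcpos
      have hrem : PySem.List.remove? l "" = some (l.erase "") :=
        PySem.List.remove?_eq_some_erase l "" hmem
      have hsum : (l.map (fun x => if PySem.Str.len x = 0 then (1 : Int) else 0)).sum ≠ 0 := by
        rw [sum_empties]; exact_mod_cast hc
      have hcount' : (l.erase "").count "" = l.count "" - 1 := List.count_erase_self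
      have hlen' : (l.erase "").length = l.length - 1 := List.length_erase_of_mem hmem
      have hlpos : 0 < l.length := List.length_pos_of_mem hmem
      have hne : ¬ (((l.erase "").length : Int) = limit) := by
        rw [hlen']; omega
      rw [mifLoop, if_pos hsum, hrem]
      dsimp only
      rw [if_neg hne]
      apply ih
      · omega
      · rw [hcount', hlen']; omega

-- enough empties: the loop returns exactly B's one-pass drop
theorem mifLoop_some : ∀ (fuel : Nat) (l : List String) (limit : Int),
    ((l.length : Int) - limit).toNat < fuel →
    1 ≤ (l.length : Int) - limit →
    (l.length : Int) - limit ≤ (l.count "" : Int) →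
    mifLoop fuel l limit = some (mifDrop ((l.length : Int) - limit) l) := by
  intro fuel
  induction fuel with
  | zero => intro l limit hf _ _; omega
  | succ f ih =>
    intro l limit hf h1 h2
    have hcpos : 0 < l.count "" := by
      by_contra h
      have hc0 : l.count "" = 0 := by omega
      rw [hc0] at h2
      simp at h2
      omega
    have hmem : "" ∈ l := List.count_pos_iff.mp hcpos
    have hrem : PySem.List.remove? l "" = some (l.erase "") :=
      PySem.List.remove?_eq_some_erase l "" hmem
    have hsum : (l.map (fun x => if PySem.Str.len x = 0 then (1 : Int) else 0)).sum ≠ 0 := by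
      rw [sum_empties]
      exact_mod_cast Nat.pos_iff_ne_zero.mp hcpos
    have hcount' : (l.erase "").count "" = l.count "" - 1 := List.count_erase_self
    have hlen' : (l.erase "").length = l.length - 1 := List.length_erase_of_mem hmem
    have hlpos : 0 < l.length := List.length_pos_of_mem hmem
    have hstep : mifDrop ((l.length : Int) - limit) l
        = mifDrop ((l.length : Int) - limit - 1) (l.erase "") :=
      mifDrop_step _ (by omega) l (l.erase "") hrem
    rw [mifLoop, if_pos hsum, hrem]
    dsimp only
    by_cases hq : ((l.erase "").length : Int) = limit
    · -- need = 1: the loop returns l.erase "", and mifDrop 1 l = l.erase ""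
      rw [if_pos hq]
      have hneed1 : (l.length : Int) - limit = 1 := by
        rw [hlen'] at hq; omega
      rw [hstep, hneed1]
      norm_num
      rw [mifDrop_nonpos 0 (by omega)]
    · rw [if_neg hq]
      have hneed2 : 2 ≤ (l.length : Int) - limit := by
        rw [hlen'] at hq; omega
      have heq : ((l.erase "").length : Int) - limit = (l.length : Int) - limit - 1 := by
        rw [hlen']; omega
      have := ih (l.erase "") limit (by rw [heq]; omega)
        (by rw [heq]; omega) (by rw [heq, hcount']; omega)
      rw [this, hstep, heq]

-- ===== VERDICT (by name: the statement is the Claim_ definition above) =====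
theorem make_it_fit_spec : Claim_equal_make_it_fit := by
  intro l limit _
  unfold Spec_make_it_fit make_it_fit make_it_fit_alt
  by_cases hle : (l.length : Int) ≤ limit
  · rw [if_pos hle, if_pos hle]
  · rw [if_neg hle, if_neg hle]
    by_cases hlt : (l.count "" : Int) < (l.length : Int) - limit
    · rw [if_pos hlt]
      exact mifLoop_none (l.length + 1) l limit
        (by have := List.count_le_length (l := l) (a := ""); omega) hlt
    · rw [if_neg hlt]
      apply mifLoop_some
      · have hcle : l.count "" ≤ l.length := List.count_le_length
        omega
      · omega
      · omega
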